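-- pv_equiv track=rewrite | github.com/CigThePig/Linear-A | analysis/scripts/lexical_expansion_2026-03-19.py | normalize_logogram
-- ===== SOURCE A (Python) =====
-- COMMODITY_LOGOGRAMS = {
--     "GRA", "VIN", "OLE", "OLIV", "VIR", "MUL", "CYP", "FIG",
--     "LANA", "OVS", "BOS", "CERV", "NI",
-- }
--
-- LOGOGRAM_PREFIXES = (
--     "GRA+", "VIN+", "OLE+", "VIR+", "CYP+", "MUL+",
--     "GRA2", "OLE2", "OLE3", "GRA3",
-- )
--
-- def normalize_logogram(token):
--     """Get the base logogram name from a compound like GRA+WA."""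
--     for lg in COMMODITY_LOGOGRAMS:
--         if token == lg or token.startswith(lg + "+"):
--             return lg
--     for prefix in LOGOGRAM_PREFIXES:
--         if token.startswith(prefix):
--             return prefix.rstrip("+").rstrip("23")
--     return token
-- ===== SOURCE B (Python) =====
-- COMMODITY_LOGOGRAMS = {
--     "GRA", "VIN", "OLE", "OLIV", "VIR", "MUL", "CYP", "FIG",
--     "LANA", "OVS", "BOS", "CERV", "NI",
-- }
--
-- BARE_NUMBERED_PREFIXES = {"GRA2", "OLE2", "OLE3", "GRA3"}
--
-- def normalize_logogram(token):
--     """Get the base logogram name from a compound like GRA+WA."""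
--     base = token.split("+", 1)[0]
--     if base in COMMODITY_LOGOGRAMS:
--         return base
--     if token[:4] in BARE_NUMBERED_PREFIXES:
--         return token[:3]
--     return token
-- ===== Notes on version B (the rewrite author's own statement) =====
-- stated objective: simpler
-- what changed: A's equality-or-startswith scan over all 13 commodity logograms is replaced by splitting the token at its first plus sign once and doing a single set lookup of that base segment, and the 10-element prefix loop is replaced by checking token[:4] against the four numbered prefixes (the six plus-terminated prefixes are unreachable once the base lookup fails), so B has no loops at all.
import Mathlib
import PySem

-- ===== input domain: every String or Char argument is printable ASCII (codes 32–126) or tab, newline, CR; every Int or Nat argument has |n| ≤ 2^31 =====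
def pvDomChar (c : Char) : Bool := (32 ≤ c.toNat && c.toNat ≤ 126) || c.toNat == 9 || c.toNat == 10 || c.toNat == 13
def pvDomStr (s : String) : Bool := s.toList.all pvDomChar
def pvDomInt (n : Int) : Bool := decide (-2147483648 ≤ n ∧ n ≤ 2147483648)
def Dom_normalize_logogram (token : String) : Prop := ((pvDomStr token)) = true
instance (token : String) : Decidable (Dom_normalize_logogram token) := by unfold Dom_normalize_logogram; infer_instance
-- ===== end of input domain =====

-- B replaces A's two linear scans by one split-at-first-'+' plus two constant lookups (objective: simpler).

-- ===== PORT A =====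
-- COMMODITY_LOGOGRAMS (a Python set of distinct string literals, in source order)
def pvCommList : List (List Char) :=
  ["GRA".toList, "VIN".toList, "OLE".toList, "OLIV".toList, "VIR".toList, "MUL".toList,
   "CYP".toList, "FIG".toList, "LANA".toList, "OVS".toList, "BOS".toList, "CERV".toList,
   "NI".toList]

-- LOGOGRAM_PREFIXES (a tuple, in source order)
def pvPrefixList : List (List Char) :=
  ["GRA+".toList, "VIN+".toList, "OLE+".toList, "VIR+".toList, "CYP+".toList, "MUL+".toList,
   "GRA2".toList, "OLE2".toList, "OLE3".toList, "GRA3".toList]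

-- hand port of str.rstrip(chars): drop trailing characters that are in chars (exact; PySem has no rstrip-with-chars)
def pvRstrip (s chars : List Char) : List Char := (s.reverse.dropWhile (· ∈ chars)).reverse

-- A's first for-loop: return the first lg with token == lg or token.startswith(lg + "+")
def pvALoop1 : List (List Char) → List Char → Option (List Char)
  | [], _ => none
  | lg :: rest, t =>
      if t = lg ∨ PySem.Chars.startswith t (lg ++ ['+']) = true then some lg
      else pvALoop1 rest t

-- A's second for-loop: return prefix.rstrip("+").rstrip("23") for the first matching prefix
def pvALoop2 : List (List Char) → List Char → Option (List Char)
  | [], _ => none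
  | p :: rest, t =>
      if PySem.Chars.startswith t p then some (pvRstrip (pvRstrip p ['+']) ['2', '3'])
      else pvALoop2 rest t

def normalize_logogram (token : String) : String :=
  match pvALoop1 pvCommList token.toList with
  | some lg => String.ofList lg
  | none =>
    match pvALoop2 pvPrefixList token.toList with
    | some r => String.ofList r
    | none => token

-- ===== PORT B =====
-- hand port of token.split("+", 1)[0]: the separator is the single character '+',
-- so the first piece is exactly the segment before the first '+' (whole string if none) — exact
def pvSplitHead : List Char → List Char
  | [] => []
  | c :: rest => if c = '+' then [] else c :: pvSplitHead rest

-- BARE_NUMBERED_PREFIXES (a Python set of distinct string literals, in source order)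
def pvBareNumbered : List (List Char) :=
  ["GRA2".toList, "OLE2".toList, "OLE3".toList, "GRA3".toList]

def normalize_logogram_alt (token : String) : String :=
  let base := pvSplitHead token.toList
  if base ∈ pvCommList then String.ofList base
  else if PySem.List.slice token.toList none (some 4) ∈ pvBareNumbered then
    String.ofList (PySem.List.slice token.toList none (some 3))
  else token

-- ===== PRECONDITION & SPEC =====
def Spec_normalize_logogram (token : String) (out : String) : Prop := out = normalize_logogram_alt token
instance (token : String) (out : String) : Decidable (Spec_normalize_logogram token out) := by unfold Spec_normalize_logogram; infer_instance

-- ===== CLAIM (what is proved, stated in full; the proofs are below) =====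
def Claim_equal_normalize_logogram : Prop := ∀ (token : String), Dom_normalize_logogram token → Spec_normalize_logogram token (normalize_logogram token)

-- ===== LEMMAS AND PROOFS =====

-- pvSplitHead of a '+'-free string is the string itself
theorem pvSplitHead_no_plus (s : List Char) (h : '+' ∉ s) : pvSplitHead s = s := by
  induction s with
  | nil => rfl
  | cons c rest ih =>
      simp only [List.mem_cons, not_or] at h
      simp [pvSplitHead, Ne.symm h.1, ih h.2]

-- pvSplitHead stops at the first '+'
theorem pvSplitHead_append_plus (lg r : List Char) (h : '+' ∉ lg) :
    pvSplitHead (lg ++ '+' :: r) = lg := by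
  induction lg with
  | nil => simp [pvSplitHead]
  | cons c rest ih =>
      simp only [List.mem_cons, not_or] at h
      simp [pvSplitHead, Ne.symm h.1, ih h.2]

-- the converse: the string is its head, or head ++ '+' ++ rest
theorem pvSplitHead_cases (t : List Char) :
    t = pvSplitHead t ∨ (pvSplitHead t ++ ['+']) <+: t := by
  induction t with
  | nil => left; rfl
  | cons c rest ih =>
      by_cases hc : c = '+'
      · right; subst hc; simp [pvSplitHead]
      · rcases ih with h | ⟨r, hr⟩
        · left; simp [pvSplitHead, hc, ← h]
        · right
          refine ⟨r, ?_⟩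
          simp only [pvSplitHead, if_neg hc, List.cons_append, List.append_assoc,
            List.nil_append]
          simp only [List.append_assoc, List.singleton_append] at hr
          rw [hr]

-- A's loop condition for a '+'-free lg is exactly "the base equals lg"
theorem pvCond_iff (t lg : List Char) (h : '+' ∉ lg) :
    (t = lg ∨ PySem.Chars.startswith t (lg ++ ['+']) = true) ↔ pvSplitHead t = lg := by
  rw [PySem.Chars.startswith_iff]
  constructor
  · rintro (rfl | ⟨r, hr⟩)
    · exact pvSplitHead_no_plus _ h
    · rw [← hr, List.append_assoc]; exact pvSplitHead_append_plus lg r h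
  · intro hb
    rcases pvSplitHead_cases t with ht | hp
    · left; rw [ht, hb]
    · right; rw [← hb]; exact hp

-- A's first loop finds the base iff the base is a listed commodity
theorem pvALoop1_eq (t : List Char) :
    ∀ L : List (List Char), (∀ lg ∈ L, '+' ∉ lg) →
      pvALoop1 L t = if pvSplitHead t ∈ L then some (pvSplitHead t) else none := by
  intro L
  induction L with
  | nil => intro _; rfl
  | cons lg rest ih =>
      intro hL
      have hlg : '+' ∉ lg := hL lg (by simp)
      by_cases hb : pvSplitHead t = lg
      · have hc : t = lg ∨ PySem.Chars.startswith t (lg ++ ['+']) = true :=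
          (pvCond_iff t lg hlg).mpr hb
        simp [pvALoop1, hc, hb]
      · have hc : ¬(t = lg ∨ PySem.Chars.startswith t (lg ++ ['+']) = true) := by
          intro hc; exact hb ((pvCond_iff t lg hlg).mp hc)
        have := ih (fun x hx => hL x (List.mem_cons_of_mem _ hx))
        simp [pvALoop1, hc, this, hb]

-- startswith by a length-4 pattern is "take 4 equals the pattern"
theorem pvSw4 (t p : List Char) (hp : p.length = 4) :
    PySem.Chars.startswith t p = true ↔ t.take 4 = p := by
  rw [PySem.Chars.startswith_iff, List.prefix_iff_eq_take, hp, eq_comm]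

-- a '+'-ending prefix cannot match once the base lookup has failed
theorem pvSwPlus_false (t lg : List Char) (h : '+' ∉ lg) (hb : pvSplitHead t ≠ lg) :
    PySem.Chars.startswith t (lg ++ ['+']) = false := by
  by_contra hc
  have : PySem.Chars.startswith t (lg ++ ['+']) = true := by
    cases hsw : PySem.Chars.startswith t (lg ++ ['+']) <;> simp_all
  exact hb ((pvCond_iff t lg h).mp (Or.inr this))

-- evaluating A's second loop once the base lookup has failed: only the four numbered prefixes can fire
theorem pvALoop2_eval (t : List Char) (hb : pvSplitHead t ∉ pvCommList) :
    pvALoop2 pvPrefixList t =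
      if t.take 4 = "GRA2".toList then some "GRA".toList
      else if t.take 4 = "OLE2".toList then some "OLE".toList
      else if t.take 4 = "OLE3".toList then some "OLE".toList
      else if t.take 4 = "GRA3".toList then some "GRA".toList
      else none := by
  have h6 : ∀ lg ∈ (["GRA".toList, "VIN".toList, "OLE".toList, "VIR".toList,
                     "CYP".toList, "MUL".toList] : List (List Char)),
      PySem.Chars.startswith t (lg ++ ['+']) = false := by
    intro lg hlg
    refine pvSwPlus_false t lg ?_ ?_
    · fin_cases hlg <;> decide
    · intro he; apply hb; rw [he]; fin_cases hlg <;> decide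
  have g1 := h6 "GRA".toList (by decide)
  have g2 := h6 "VIN".toList (by decide)
  have g3 := h6 "OLE".toList (by decide)
  have g4 := h6 "VIR".toList (by decide)
  have g5 := h6 "CYP".toList (by decide)
  have g6 := h6 "MUL".toList (by decide)
  have e1 : "GRA+".toList = "GRA".toList ++ ['+'] := by decide
  have e2 : "VIN+".toList = "VIN".toList ++ ['+'] := by decide
  have e3 : "OLE+".toList = "OLE".toList ++ ['+'] := by decide
  have e4 : "VIR+".toList = "VIR".toList ++ ['+'] := by decide
  have e5 : "CYP+".toList = "CYP".toList ++ ['+'] := by decide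
  have e6 : "MUL+".toList = "MUL".toList ++ ['+'] := by decide
  have w1 : PySem.Chars.startswith t "GRA2".toList = decide (t.take 4 = "GRA2".toList) := by
    rw [Bool.eq_iff_iff, pvSw4 t _ (by decide)]; simp
  have w2 : PySem.Chars.startswith t "OLE2".toList = decide (t.take 4 = "OLE2".toList) := by
    rw [Bool.eq_iff_iff, pvSw4 t _ (by decide)]; simp
  have w3 : PySem.Chars.startswith t "OLE3".toList = decide (t.take 4 = "OLE3".toList) := by
    rw [Bool.eq_iff_iff, pvSw4 t _ (by decide)]; simp
  have w4 : PySem.Chars.startswith t "GRA3".toList = decide (t.take 4 = "GRA3".toList) := by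
    rw [Bool.eq_iff_iff, pvSw4 t _ (by decide)]; simp
  simp only [pvALoop2, pvPrefixList, e1, e2, e3, e4, e5, e6, g1, g2, g3, g4, g5, g6,
    w1, w2, w3, w4, Bool.false_eq_true, if_false, decide_eq_true_eq]
  split_ifs <;> rfl

-- take 3 through a known take 4
theorem pvTake3_of_take4 (t p : List Char) (h : List.take 4 t = p) :
    List.take 3 t = List.take 3 p := by
  rw [← h, List.take_take]; norm_num

-- ===== VERDICT (by name: the statement is the Claim_ definition above) =====
theorem normalize_logogram_spec : Claim_equal_normalize_logogram := by
  intro token _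
  unfold Spec_normalize_logogram normalize_logogram normalize_logogram_alt
  set t := token.toList with ht
  have hcomm : ∀ lg ∈ pvCommList, '+' ∉ lg := by decide
  rw [pvALoop1_eq t pvCommList hcomm]
  have hsl4 : PySem.List.slice t none (some 4) = t.take 4 := by
    rw [PySem.List.slice_to t (by norm_num)]; rfl
  have hsl3 : PySem.List.slice t none (some 3) = t.take 3 := by
    rw [PySem.List.slice_to t (by norm_num)]; rfl
  by_cases hb : pvSplitHead t ∈ pvCommList
  · simp [hb]
  · simp only [hb, if_false]
    rw [pvALoop2_eval t hb]
    simp only [hsl4, hsl3]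
    by_cases s1 : t.take 4 = "GRA2".toList
    · rw [pvTake3_of_take4 t _ s1]
      simp [s1, pvBareNumbered]
    · by_cases s2 : t.take 4 = "OLE2".toList
      · rw [pvTake3_of_take4 t _ s2]
        simp [s2, pvBareNumbered]
      · by_cases s3 : t.take 4 = "OLE3".toList
        · rw [pvTake3_of_take4 t _ s3]
          simp [s3, pvBareNumbered]
        · by_cases s4 : t.take 4 = "GRA3".toList
          · rw [pvTake3_of_take4 t _ s4]
            simp [s4, pvBareNumbered]
          · rw [if_neg s1, if_neg s2, if_neg s3, if_neg s4,
              if_neg (by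
                simp only [pvBareNumbered, List.mem_cons, List.not_mem_nil, or_false, not_or]
                exact ⟨fun h => s1 (h.trans (by decide)), fun h => s2 (h.trans (by decide)),
                  fun h => s3 (h.trans (by decide)), fun h => s4 (h.trans (by decide))⟩)]
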